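-- pv_equiv track=rewrite | github.com/juanauli/Inversion-Sequences-Consecutive-Patterns-of-Relations | count_consec_ineq3.py | count_eq_neq
-- ===== SOURCE A (Python) =====
-- def count_eq_neq(sequence):
--     index = 0
--     counter = 0
--     while index < len(sequence) - 2:
--         if sequence[index] == sequence[index + 1] != sequence[index + 2]:
--             counter += 1
--         index += 1
--     return counter
-- ===== SOURCE B (Python) =====
-- def count_eq_neq(sequence):
--     eq = [x == y for x, y in zip(sequence, sequence[1:])]
--     return sum(1 for a, b in zip(eq, eq[1:]) if a and not b)
-- ===== Notes on version B (the rewrite author's own statement) =====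
-- stated objective: simpler
-- what changed: Replaced the index-based while loop over triples by computing the adjacency-equality list eq via zip and counting True-to-False edges in eq (a[i]==a[i+1]!=a[i+2] iff eq[i] and not eq[i+1]).
import Mathlib
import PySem

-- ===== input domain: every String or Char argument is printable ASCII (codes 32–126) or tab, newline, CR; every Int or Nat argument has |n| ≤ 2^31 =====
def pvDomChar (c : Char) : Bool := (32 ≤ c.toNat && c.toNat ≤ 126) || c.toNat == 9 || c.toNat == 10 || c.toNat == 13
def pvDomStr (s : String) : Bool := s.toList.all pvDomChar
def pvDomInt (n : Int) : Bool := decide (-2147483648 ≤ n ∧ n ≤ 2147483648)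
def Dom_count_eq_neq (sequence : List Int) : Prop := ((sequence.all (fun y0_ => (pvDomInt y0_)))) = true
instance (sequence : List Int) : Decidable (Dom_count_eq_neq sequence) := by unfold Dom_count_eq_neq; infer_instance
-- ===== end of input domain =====

-- B replaces A's index-based while loop by an adjacency-equality list built with zip
-- and a count of its True→False edges (simpler decomposition; same O(n) cost).

-- ===== PORT A =====
-- the while loop: state (index, counter), condition index < len - 2
def count_eq_neq_go (s : List Int) (index counter : Int) : Int :=
  if index < (s.length : Int) - 2 then
    count_eq_neq_go s (index + 1)
      (if PySem.List.pyGet? s index = PySem.List.pyGet? s (index + 1) ∧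
          PySem.List.pyGet? s (index + 1) ≠ PySem.List.pyGet? s (index + 2)
       then counter + 1 else counter)
  else counter
termination_by ((s.length : Int) - 2 - index).toNat
decreasing_by omega

def count_eq_neq (sequence : List Int) : Int :=
  count_eq_neq_go sequence 0 0

-- ===== PORT B =====
-- eq = [x == y for x, y in zip(sequence, sequence[1:])]
-- return sum(1 for a, b in zip(eq, eq[1:]) if a and not b)
def count_eq_neq_alt (sequence : List Int) : Int :=
  let eq : List Bool :=
    (sequence.zip (PySem.List.slice sequence (some 1) none)).map (fun p => decide (p.1 = p.2))
  (eq.zip (PySem.List.slice eq (some 1) none)).foldl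
    (fun acc p => if p.1 && !p.2 then acc + 1 else acc) 0

-- ===== PRECONDITION & SPEC =====
def Spec_count_eq_neq (sequence : List Int) (out : Int) : Prop := out = count_eq_neq_alt sequence
instance (sequence : List Int) (out : Int) : Decidable (Spec_count_eq_neq sequence out) := by unfold Spec_count_eq_neq; infer_instance

-- ===== CLAIM (what is proved, stated in full; the proofs are below) =====
def Claim_equal_count_eq_neq : Prop := ∀ (sequence : List Int), Dom_count_eq_neq sequence → Spec_count_eq_neq sequence (count_eq_neq sequence)

-- ===== LEMMAS AND PROOFS =====

-- canonical structural count of positions with a = b ≠ c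
def tripleCount : List Int → Int
  | a :: b :: c :: t => (if a = b ∧ b ≠ c then 1 else 0) + tripleCount (b :: c :: t)
  | _ => 0

theorem tripleCount_short (l : List Int) (h : l.length ≤ 2) : tripleCount l = 0 := by
  match l, h with
  | [], _ => rfl
  | [_], _ => rfl
  | [_, _], _ => rfl

-- shifting the foldl accumulator of B's counting loop
theorem foldl_count_shift (l : List (Bool × Bool)) (c : Int) :
    l.foldl (fun acc p => if p.1 && !p.2 then acc + 1 else acc) c
      = c + l.foldl (fun acc p => if p.1 && !p.2 then acc + 1 else acc) 0 := by
  induction l generalizing c with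
  | nil => simp
  | cons p t ih =>
    simp only [List.foldl_cons]
    rw [ih, ih (if p.1 && !p.2 then 0 + 1 else 0)]
    split <;> ring

-- B computes tripleCount
theorem alt_eq_tripleCount (s : List Int) : count_eq_neq_alt s = tripleCount s := by
  induction s using tripleCount.induct with
  | case1 a b c t ih =>
    simp only [count_eq_neq_alt, PySem.List.slice_from_one, List.tail_cons, List.zip_cons_cons,
      List.map_cons, List.foldl_cons] at ih ⊢
    rw [foldl_count_shift, ih, tripleCount]
    by_cases hab : a = b <;> by_cases hbc : b = c <;> simp [hab, hbc]
  | case2 l h =>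
    match l, h with
    | [], _ => rfl
    | [_], _ => rfl
    | [_, _], _ => rfl
    | a :: b :: c :: t, h => exact absurd rfl (h a b c t)

theorem go_eq (s : List Int) (i c : Int) (hi : 0 ≤ i) :
    count_eq_neq_go s i c = c + tripleCount (s.drop i.toNat) := by
  rw [count_eq_neq_go]
  split
  · rename_i h
    have h0 : i < (s.length : Int) := by omega
    have h1 : i + 1 < (s.length : Int) := by omega
    have h2 : i + 2 < (s.length : Int) := by omega
    have hn0 : i.toNat < s.length := by omega
    have hn1 : i.toNat + 1 < s.length := by omega
    have hn2 : i.toNat + 2 < s.length := by omega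
    have e0 : PySem.List.pyGet? s i = some s[i.toNat] := by
      rw [PySem.List.pyGet?_eq_some_getElem] <;> omega
    have e1 : PySem.List.pyGet? s (i + 1) = some s[i.toNat + 1] := by
      rw [PySem.List.pyGet?_eq_some_getElem] <;> try omega
      simp only [show (i + 1).toNat = i.toNat + 1 from by omega]
    have e2 : PySem.List.pyGet? s (i + 2) = some s[i.toNat + 2] := by
      rw [PySem.List.pyGet?_eq_some_getElem] <;> try omega
      simp only [show (i + 2).toNat = i.toNat + 2 from by omega]
    rw [go_eq s (i + 1) _ (by omega)]
    simp only [show (i + 1).toNat = i.toNat + 1 from by omega]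
    rw [List.drop_eq_getElem_cons hn0, List.drop_eq_getElem_cons hn1,
      List.drop_eq_getElem_cons hn2, tripleCount]
    simp only [e0, e1, e2, Option.some.injEq, ne_eq]
    split_ifs with hc <;> ring
  · rename_i h
    rw [tripleCount_short _ (by rw [List.length_drop]; omega)]
    ring
termination_by ((s.length : Int) - 2 - i).toNat
decreasing_by omega

-- ===== VERDICT (by name: the statement is the Claim_ definition above) =====
theorem count_eq_neq_spec : Claim_equal_count_eq_neq := by
  intro s _
  unfold Spec_count_eq_neq
  rw [alt_eq_tripleCount, count_eq_neq, go_eq s 0 0 le_rfl]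
  simp
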